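-- pv_equiv track=rewrite | github.com/toursmilegpt-netizen/toursmile | deployment_package/backend/real_hotel_api.py | get_hotel_image
-- ===== SOURCE A (Python) =====
-- def get_hotel_image(hotel_name: str) -> str:
--     """Get a representative image for the hotel"""
--     # Using Unsplash for hotel images with relevant search terms
--     hotel_name_lower = hotel_name.lower()
--
--     if 'mumbai' in hotel_name_lower or 'bombay' in hotel_name_lower:
--         return 'https://images.unsplash.com/photo-1571896349842-33c89424de2d?w=400'
--     elif any(word in hotel_name_lower for word in ['luxury', 'grand', 'palace']):
--         return 'https://images.unsplash.com/photo-1564501049412-61c2a3083791?w=400'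
--     elif 'airport' in hotel_name_lower:
--         return 'https://images.unsplash.com/photo-1551882547-ff40c63fe5fa?w=400'
--     else:
--         return 'https://images.unsplash.com/photo-1566073771259-6a8506099945?w=400'
-- ===== SOURCE B (Python) =====
-- URLS = [
--     'https://images.unsplash.com/photo-1571896349842-33c89424de2d?w=400',  # 0: mumbai
--     'https://images.unsplash.com/photo-1564501049412-61c2a3083791?w=400',  # 1: luxury
--     'https://images.unsplash.com/photo-1551882547-ff40c63fe5fa?w=400',     # 2: airport
--     'https://images.unsplash.com/photo-1566073771259-6a8506099945?w=400',  # 3: default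
-- ]
--
-- KEYWORD_PRIORITY = {
--     'mumbai': 0, 'bombay': 0,
--     'luxury': 1, 'grand': 1, 'palace': 1,
--     'airport': 2,
-- }
--
-- def get_hotel_image(hotel_name: str) -> str:
--     """Get a representative image for the hotel"""
--     name = hotel_name.lower()
--     best = min((p for k, p in KEYWORD_PRIORITY.items() if k in name), default=3)
--     return URLS[best]
-- ===== Notes on version B (the rewrite author's own statement) =====
-- stated objective: alternative
-- what changed: Replaces the ordered if/elif branch chain by a flat keyword->priority map: B takes the minimum priority over all matched keywords in one pass and indexes a URL table with it, instead of testing categories in order and returning at the first hit.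
import Mathlib
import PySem

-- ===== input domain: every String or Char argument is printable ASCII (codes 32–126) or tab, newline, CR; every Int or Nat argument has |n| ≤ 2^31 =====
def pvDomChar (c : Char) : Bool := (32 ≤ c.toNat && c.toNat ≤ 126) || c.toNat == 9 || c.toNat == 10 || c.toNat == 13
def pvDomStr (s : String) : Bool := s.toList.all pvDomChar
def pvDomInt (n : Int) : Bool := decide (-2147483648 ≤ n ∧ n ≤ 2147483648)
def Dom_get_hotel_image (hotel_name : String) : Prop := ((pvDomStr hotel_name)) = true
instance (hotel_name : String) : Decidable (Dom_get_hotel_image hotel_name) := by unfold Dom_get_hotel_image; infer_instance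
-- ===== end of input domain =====

-- B replaces the if/elif chain by a min-priority computation over a flat keyword->priority map, indexing a URL table (alternative decomposition).


-- ===== PORT A =====
def get_hotel_image (hotel_name : String) : String :=
  let hotel_name_lower := PySem.Str.lower hotel_name
  if PySem.Str.isIn "mumbai" hotel_name_lower || PySem.Str.isIn "bombay" hotel_name_lower then
    "https://images.unsplash.com/photo-1571896349842-33c89424de2d?w=400"
  else if ["luxury", "grand", "palace"].any (fun word => PySem.Str.isIn word hotel_name_lower) then
    "https://images.unsplash.com/photo-1564501049412-61c2a3083791?w=400"
  else if PySem.Str.isIn "airport" hotel_name_lower then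
    "https://images.unsplash.com/photo-1551882547-ff40c63fe5fa?w=400"
  else
    "https://images.unsplash.com/photo-1566073771259-6a8506099945?w=400"

-- ===== PORT B =====
-- B: flat keyword -> priority map; answer = URL table indexed by min matched priority (default 3)
def pvUrls : List String :=
  ["https://images.unsplash.com/photo-1571896349842-33c89424de2d?w=400",
   "https://images.unsplash.com/photo-1564501049412-61c2a3083791?w=400",
   "https://images.unsplash.com/photo-1551882547-ff40c63fe5fa?w=400",
   "https://images.unsplash.com/photo-1566073771259-6a8506099945?w=400"]

def pvKeywordPriority : List (String × Nat) :=
  [("mumbai", 0), ("bombay", 0),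
   ("luxury", 1), ("grand", 1), ("palace", 1),
   ("airport", 2)]

def get_hotel_image_alt (hotel_name : String) : String :=
  let name := PySem.Str.lower hotel_name
  -- min over the matched priorities, default 3 (Python: min(gen, default=3))
  let best := (pvKeywordPriority.filterMap
      (fun kp => if PySem.Str.isIn kp.1 name then some kp.2 else none)).foldl min 3
  pvUrls.getD best ""

-- ===== PRECONDITION & SPEC =====
def Spec_get_hotel_image (hotel_name : String) (out : String) : Prop := out = get_hotel_image_alt hotel_name
instance (hotel_name : String) (out : String) : Decidable (Spec_get_hotel_image hotel_name out) := by unfold Spec_get_hotel_image; infer_instance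

-- ===== CLAIM =====
def Claim_equal_get_hotel_image : Prop := ∀ (hotel_name : String), Dom_get_hotel_image hotel_name → Spec_get_hotel_image hotel_name (get_hotel_image hotel_name)

-- ===== LEMMAS AND PROOFS =====

-- ===== VERDICT =====
theorem get_hotel_image_spec : Claim_equal_get_hotel_image := by
  intro hotel_name _
  unfold Spec_get_hotel_image get_hotel_image get_hotel_image_alt pvKeywordPriority pvUrls
  simp only [List.filterMap_cons, List.filterMap_nil, List.any_cons, List.any_nil, Bool.or_false]
  cases h1 : PySem.Str.isIn "mumbai" (PySem.Str.lower hotel_name) <;>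
  cases h2 : PySem.Str.isIn "bombay" (PySem.Str.lower hotel_name) <;>
  cases h3 : PySem.Str.isIn "luxury" (PySem.Str.lower hotel_name) <;>
  cases h4 : PySem.Str.isIn "grand" (PySem.Str.lower hotel_name) <;>
  cases h5 : PySem.Str.isIn "palace" (PySem.Str.lower hotel_name) <;>
  cases h6 : PySem.Str.isIn "airport" (PySem.Str.lower hotel_name) <;>
    simp [h1, h2, h3, h4, h5, h6, List.getD]
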